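-- pv_equiv track=rewrite | github.com/naraballans-lab/tracking2025 | analyzer.py | _is_continuous_quadrant_sequence
-- ===== SOURCE A (Python) =====
-- def _is_continuous_quadrant_sequence(quadrant_sequence):
--     """
--     Verifica si una secuencia de cuadrantes representa un movimiento continuo/lineal
--     Args:
--         quadrant_sequence: Lista de cuadrantes visitados
--     Returns:
--         bool: True si la secuencia es continua
--     """
--     if len(quadrant_sequence) < 2:
--         return False
--
--     # Obtener solo los cuadrantes únicos en orden
--     unique_sequence = []
--     for q in quadrant_sequence:
--         if not unique_sequence or q != unique_sequence[-1]:
--             unique_sequence.append(q)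
--
--     if len(unique_sequence) < 2:
--         return False
--
--     # Verificar que no hay saltos demasiado grandes entre cuadrantes consecutivos
--     for i in range(1, len(unique_sequence)):
--         prev = unique_sequence[i-1]
--         curr = unique_sequence[i]
--
--         # Calcular posición del cuadrante en la grilla
--         prev_row, prev_col = prev // 4, prev % 4
--         curr_row, curr_col = curr // 4, curr % 4
--
--         # Distancia Manhattan entre cuadrantes
--         distance = abs(curr_row - prev_row) + abs(curr_col - prev_col)
--
--         # Permitir movimientos a cuadrantes adyacentes (distancia <= 2, incluyendo diagonales)
--         # Para movimiento lineal, permitir distancia máxima de 2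
--         if distance > 2:
--             return False
--
--     return True
-- ===== SOURCE B (Python) =====
-- def _is_continuous_quadrant_sequence(quadrant_sequence):
--     """Declarative pairwise formulation over zipped adjacent pairs: continuous iff
--     some adjacent pair differs and every adjacent pair is equal or within
--     Manhattan distance 2 on the (//4, %4) grid.  No dedup list, no loop state."""
--     pairs = list(zip(quadrant_sequence, quadrant_sequence[1:]))
--     if not pairs:
--         return False
--     if all(a == b for a, b in pairs):
--         return False
--     return all(a == b or abs(a // 4 - b // 4) + abs(a % 4 - b % 4) <= 2
--                for a, b in pairs)
-- ===== Notes on version B (the rewrite author's own statement) =====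
-- stated objective: simpler
-- what changed: Replaced A's stateful two-stage algorithm (build a run-deduplicated list, then index-scan it for big jumps) by a stateless declarative test on the zipped adjacent pairs of the original list: some pair must differ and every pair must be equal or within Manhattan distance 2; correct because the distinct adjacent pairs of the deduped list are exactly the distinct adjacent pairs of the original.
import Mathlib
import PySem

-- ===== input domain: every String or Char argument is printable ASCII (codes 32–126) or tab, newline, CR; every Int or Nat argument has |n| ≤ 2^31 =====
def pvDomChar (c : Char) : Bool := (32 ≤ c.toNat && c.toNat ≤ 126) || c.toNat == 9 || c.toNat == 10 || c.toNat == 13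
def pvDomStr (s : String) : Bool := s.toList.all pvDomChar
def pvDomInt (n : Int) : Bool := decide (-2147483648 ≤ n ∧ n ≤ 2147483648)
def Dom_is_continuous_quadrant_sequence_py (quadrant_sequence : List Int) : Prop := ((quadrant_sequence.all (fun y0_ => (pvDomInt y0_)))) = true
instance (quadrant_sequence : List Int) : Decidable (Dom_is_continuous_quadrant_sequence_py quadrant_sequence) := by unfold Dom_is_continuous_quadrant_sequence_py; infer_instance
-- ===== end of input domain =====

-- B replaces A's stateful dedup-then-scan by a stateless pairwise test on zipped adjacent pairs; objective: simpler.

-- ===== PORT A =====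
-- first loop of A: append q when the accumulator is empty or q differs from its last element
def pvUniqStep (acc : List Int) (q : Int) : List Int :=
  if acc.isEmpty || decide (q ≠ (acc.getLast?.getD 0)) then acc ++ [q] else acc

-- Python's abs(curr//4 - prev//4) + abs(curr%4 - prev%4) (floor division / Python %)
def pvDist (prev curr : Int) : Nat :=
  (PySem.Int.floordiv curr 4 - PySem.Int.floordiv prev 4).natAbs
  + (PySem.Int.mod curr 4 - PySem.Int.mod prev 4).natAbs

-- second loop of A: for i in range(1, len(u)) compare u[i-1] with u[i]; early return False
def pvAdjOk : List Int → Bool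
  | a :: b :: rest => if pvDist a b > 2 then false else pvAdjOk (b :: rest)
  | _ => true

def is_continuous_quadrant_sequence_py (quadrant_sequence : List Int) : Bool :=
  if quadrant_sequence.length < 2 then false
  else
    let unique_sequence := quadrant_sequence.foldl pvUniqStep []
    if unique_sequence.length < 2 then false
    else pvAdjOk unique_sequence

-- ===== PORT B =====
-- B's pair predicate: a == b or abs(a//4 - b//4) + abs(a%4 - b%4) <= 2
def pvPairOk (p : Int × Int) : Bool :=
  p.1 == p.2
  || decide ((PySem.Int.floordiv p.1 4 - PySem.Int.floordiv p.2 4).natAbs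
             + (PySem.Int.mod p.1 4 - PySem.Int.mod p.2 4).natAbs ≤ 2)

def is_continuous_quadrant_sequence_py_alt (quadrant_sequence : List Int) : Bool :=
  -- pairs = list(zip(qs, qs[1:]))
  let pairs := quadrant_sequence.zip (PySem.List.slice quadrant_sequence (some 1) none)
  if pairs.isEmpty then false
  else if pairs.all (fun p => p.1 == p.2) then false
  else pairs.all pvPairOk

-- ===== PRECONDITION & SPEC =====
def Spec_is_continuous_quadrant_sequence_py (quadrant_sequence : List Int) (out : Bool) : Prop := out = is_continuous_quadrant_sequence_py_alt quadrant_sequence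
instance (quadrant_sequence : List Int) (out : Bool) : Decidable (Spec_is_continuous_quadrant_sequence_py quadrant_sequence out) := by unfold Spec_is_continuous_quadrant_sequence_py; infer_instance

-- ===== CLAIM =====
def Claim_equal_is_continuous_quadrant_sequence_py : Prop := ∀ (quadrant_sequence : List Int), Dom_is_continuous_quadrant_sequence_py quadrant_sequence → Spec_is_continuous_quadrant_sequence_py quadrant_sequence (is_continuous_quadrant_sequence_py quadrant_sequence)

-- ===== LEMMAS AND PROOFS =====

-- mathematical description of A's first loop: run-deduplication after a given previous element
def pvRuns : Int → List Int → List Int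
  | _, [] => []
  | prev, q :: rest => if q ≠ prev then q :: pvRuns q rest else pvRuns prev rest

theorem pvFoldl_uniq (xs : List Int) : ∀ (ys : List Int) (a : Int),
    xs.foldl pvUniqStep (ys ++ [a]) = (ys ++ [a]) ++ pvRuns a xs := by
  induction xs with
  | nil => intro ys a; simp [pvRuns]
  | cons q rest ih =>
    intro ys a
    by_cases h : q = a
    · subst h
      simp [List.foldl, pvUniqStep, pvRuns, ih]
    · have hstep : pvUniqStep (ys ++ [a]) q = (ys ++ [a]) ++ [q] := by
        simp [pvUniqStep, h]
      simp only [List.foldl, hstep, pvRuns, if_pos h]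
      rw [ih (ys ++ [a]) q]
      simp

theorem pvPairOk_eq (a b : Int) :
    pvPairOk (a, b) = (a == b || !decide (pvDist a b > 2)) := by
  have h1 : ∀ x : Nat, (!decide (x > 2)) = decide (x ≤ 2) := by
    intro x; by_cases h : x > 2 <;> simp [h] <;> omega
  have h2 : ∀ x y : Int, (x - y).natAbs = (y - x).natAbs := fun x y => by omega
  unfold pvPairOk pvDist
  rw [h1, h2 (PySem.Int.floordiv b 4) (PySem.Int.floordiv a 4),
      h2 (PySem.Int.mod b 4) (PySem.Int.mod a 4)]

-- A's adjacency scan of (a :: runs) equals B's all-pairs test on (a :: xs)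
theorem pvAdjOk_runs (xs : List Int) : ∀ (a : Int),
    pvAdjOk (a :: pvRuns a xs) = ((a :: xs).zip xs).all pvPairOk := by
  induction xs with
  | nil => intro a; simp [pvRuns, pvAdjOk]
  | cons q rest ih =>
    intro a
    by_cases h : q = a
    · rw [h]
      have : ((a :: a :: rest).zip (a :: rest)).all pvPairOk
          = (pvPairOk (a, a) && ((a :: rest).zip rest).all pvPairOk) := by
        simp [List.zip]
      rw [this, ← ih a]
      simp [pvPairOk, pvRuns]
    · have hruns : pvRuns a (q :: rest) = q :: pvRuns q rest := by simp [pvRuns, h]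
      rw [hruns]
      have hz : ((a :: q :: rest).zip (q :: rest)).all pvPairOk
          = (pvPairOk (a, q) && ((q :: rest).zip rest).all pvPairOk) := by
        simp [List.zip]
      rw [hz, ← ih q, pvPairOk_eq]
      have hne : (a == q) = false := by simp [Ne.symm h]
      by_cases hd : pvDist a q > 2
      · simp [pvAdjOk, hd, hne]
      · simp [pvAdjOk, hd, hne]

-- the deduped tail is empty iff every adjacent pair is equal
theorem pvRuns_nil_iff (xs : List Int) : ∀ (a : Int),
    (pvRuns a xs = []) ↔ (((a :: xs).zip xs).all (fun p => p.1 == p.2)) = true := by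
  induction xs with
  | nil => intro a; simp [pvRuns]
  | cons q rest ih =>
    intro a
    by_cases h : q = a
    · rw [h]
      simpa [pvRuns, List.zip] using ih a
    · simp [pvRuns, h, List.zip, Ne.symm h]

-- ===== VERDICT =====
theorem is_continuous_quadrant_sequence_py_spec : Claim_equal_is_continuous_quadrant_sequence_py := by
  intro qs _
  unfold Spec_is_continuous_quadrant_sequence_py
  match qs with
  | [] => rfl
  | [a] => rfl
  | a :: b :: rest =>
    unfold is_continuous_quadrant_sequence_py is_continuous_quadrant_sequence_py_alt
    have hu : (a :: b :: rest).foldl pvUniqStep [] = a :: pvRuns a (b :: rest) := by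
      have h1 : (a :: b :: rest).foldl pvUniqStep []
          = (b :: rest).foldl pvUniqStep ([] ++ [a]) := by
        simp [List.foldl, pvUniqStep]
      rw [h1, pvFoldl_uniq]
      simp
    rw [PySem.List.slice_from_one]
    simp only [hu, List.tail]
    have hlen2 : ¬ ((a : Int) :: b :: rest).length < 2 := by simp
    rw [if_neg hlen2]
    have hpairs : ¬ (((a :: b :: rest).zip (b :: rest)).isEmpty = true) := by
      simp [List.zip]
    rw [if_neg hpairs]
    by_cases heq : (((a :: b :: rest).zip (b :: rest)).all (fun p => p.1 == p.2)) = true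
    · have hr : pvRuns a (b :: rest) = [] := (pvRuns_nil_iff (b :: rest) a).mpr heq
      rw [hr, if_pos heq]
      simp
    · have hr : pvRuns a (b :: rest) ≠ [] := fun h => heq ((pvRuns_nil_iff (b :: rest) a).mp h)
      have hlen : ¬ (a :: pvRuns a (b :: rest)).length < 2 := by
        cases h : pvRuns a (b :: rest) with
        | nil => exact absurd h hr
        | cons x xs => simp
      rw [if_neg hlen, if_neg heq]
      exact pvAdjOk_runs (b :: rest) a
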